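-- pv_equiv track=rewrite | github.com/johnsykim/LearningHub | kattis/symmetricorder.py | symmetric_order
-- ===== SOURCE A (Python) =====
-- from collections import deque
--
-- def symmetric_order(arr):
--     n = len(arr)
--     d = deque()
--     if n % 2 == 0:
--         for idx in range(n - 1, -1, -2):
--             d.append(arr[idx])
--         for idx in range(n - 2, -1, -2):
--             d.appendleft(arr[idx])
--         return list(d)
--     else:
--         for idx in range(n - 1, -1, -2):
--             d.appendleft(arr[idx])
--         for idx in range(n - 2, -1, -2):
--             d.append(arr[idx])
--         return list(d)
-- ===== SOURCE B (Python) =====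
-- def symmetric_order(arr):
--     front, back = [], []
--     n = len(arr)
--     i = 0
--     while i + 1 < n:
--         front.append(arr[i])
--         back.append(arr[i + 1])
--         i += 2
--     if i < n:
--         front.append(arr[i])
--     back.reverse()
--     return front + back
-- ===== Notes on version B (the rewrite author's own statement) =====
-- stated objective: simpler
-- what changed: A builds a deque with two backward-stepping index loops chosen by a parity branch; B makes one forward pass collecting even- and odd-position elements into two plain lists and returns front + reversed back, with no deque and no parity branch.
import Mathlib
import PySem

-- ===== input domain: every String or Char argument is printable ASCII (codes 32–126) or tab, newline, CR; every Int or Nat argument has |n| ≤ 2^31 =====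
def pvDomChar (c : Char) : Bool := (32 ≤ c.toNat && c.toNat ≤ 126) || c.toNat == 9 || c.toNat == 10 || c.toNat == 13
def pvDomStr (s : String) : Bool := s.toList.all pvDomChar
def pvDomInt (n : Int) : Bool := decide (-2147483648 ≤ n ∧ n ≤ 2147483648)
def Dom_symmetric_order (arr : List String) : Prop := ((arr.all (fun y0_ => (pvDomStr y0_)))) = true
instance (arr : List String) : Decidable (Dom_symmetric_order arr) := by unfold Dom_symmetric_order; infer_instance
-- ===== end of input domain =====

-- B replaces A's deque and two parity-branched backward index loops with a single
-- forward pass collecting even/odd positions into two lists (objective: simpler; same O(n) cost).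

-- ===== PORT A =====
-- deque ported as a List String: d.append x = d ++ [x], d.appendleft x = x :: d
def symmetric_order (arr : List String) : List String :=
  let n : Int := arr.length
  if n % 2 = 0 then
    let d1 := (PySem.List.pyRange (n - 1) (-1) (-2)).foldl
      (fun d idx => d ++ [PySem.List.pyGetD arr idx ""]) []
    let d2 := (PySem.List.pyRange (n - 2) (-1) (-2)).foldl
      (fun d idx => PySem.List.pyGetD arr idx "" :: d) d1
    d2
  else
    let d1 := (PySem.List.pyRange (n - 1) (-1) (-2)).foldl
      (fun d idx => PySem.List.pyGetD arr idx "" :: d) []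
    let d2 := (PySem.List.pyRange (n - 2) (-1) (-2)).foldl
      (fun d idx => d ++ [PySem.List.pyGetD arr idx ""]) d1
    d2

-- ===== PORT B =====
-- the while loop of Source B: state (front, back, i), advancing i by 2 while i + 1 < len(arr)
def symAltLoop (arr : List String) (front back : List String) (i : Nat) :
    List String × List String × Nat :=
  if h : i + 1 < arr.length then
    symAltLoop arr (front ++ [arr[i]]) (back ++ [arr[i + 1]]) (i + 2)
  else
    (front, back, i)
termination_by arr.length - i

def symmetric_order_alt (arr : List String) : List String :=
  let r := symAltLoop arr [] [] 0
  let front := if h : r.2.2 < arr.length then r.1 ++ [arr[r.2.2]] else r.1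
  front ++ r.2.1.reverse

-- ===== PRECONDITION & SPEC =====
def Spec_symmetric_order (arr : List String) (out : List String) : Prop := out = symmetric_order_alt arr
instance (arr : List String) (out : List String) : Decidable (Spec_symmetric_order arr out) := by unfold Spec_symmetric_order; infer_instance

-- ===== CLAIM (what is proved, stated in full; the proofs are below) =====
def Claim_equal_symmetric_order : Prop := ∀ (arr : List String), Dom_symmetric_order arr → Spec_symmetric_order arr (symmetric_order arr)

-- ===== LEMMAS AND PROOFS =====

-- canonical form both ports are reduced to: the elements at positions i, i+2, i+4, … of arr
def everyOtherFrom (arr : List String) (i : Nat) : List String :=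
  if h : i < arr.length then arr[i] :: everyOtherFrom arr (i + 2) else []
termination_by arr.length - i

theorem eOF_cons (arr : List String) (i : Nat) (h : i < arr.length) :
    everyOtherFrom arr i = arr[i] :: everyOtherFrom arr (i + 2) := by
  rw [everyOtherFrom, dif_pos h]

theorem eOF_nil (arr : List String) (i : Nat) (h : ¬ i < arr.length) :
    everyOtherFrom arr i = [] := by
  rw [everyOtherFrom, dif_neg h]

theorem foldl_append_map (l : List Int) (g : Int → String) (init : List String) :
    l.foldl (fun d idx => d ++ [g idx]) init = init ++ l.map g := by
  induction l generalizing init with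
  | nil => simp
  | cons x xs ih => simp [List.foldl, ih]

theorem foldl_cons_map (l : List Int) (g : Int → String) (init : List String) :
    l.foldl (fun d idx => g idx :: d) init = (l.map g).reverse ++ init := by
  induction l generalizing init with
  | nil => simp
  | cons x xs ih => simp [List.foldl, ih]

theorem pyRange_neg_two (m : Nat) :
    PySem.List.pyRange (m : Int) (-1) (-2) =
      (List.range (m / 2 + 1)).map (fun k : Nat => (m : Int) - 2 * (k : Int)) := by
  unfold PySem.List.pyRange
  have h3 : (-1 : Int) < (m : Int) := by omega
  rw [if_neg (by decide : ¬ ((-2:Int) = 0))]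
  rw [if_neg (by decide : ¬ ((0:Int) < -2)), if_pos h3]
  have hc : (((m:Int) - -1 + - -2 - 1) / - -2).toNat = m / 2 + 1 := by
    norm_num
    omega
  rw [hc]
  exact List.map_congr_left (fun k _ => by ring)

theorem pyRange_neg_two_neg (a : Int) (ha : a < 0) :
    PySem.List.pyRange a (-1) (-2) = [] := by
  unfold PySem.List.pyRange
  have h3 : ¬ ((-1 : Int) < a) := by omega
  norm_num [h3]

theorem everyOtherFrom_eq_range (arr : List String) (s : Nat) :
    everyOtherFrom arr s =
      (List.range ((arr.length - s + 1) / 2)).map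
        (fun k : Nat => PySem.List.pyGetD arr ((s : Int) + 2 * (k : Int)) "") := by
  fun_induction everyOtherFrom arr s with
  | case1 s h ih =>
    have hc : (arr.length - s + 1) / 2 = (arr.length - (s + 2) + 1) / 2 + 1 := by omega
    rw [hc, List.range_succ_eq_map, List.map_cons, List.map_map]
    refine List.cons_eq_cons.mpr ⟨?_, ?_⟩
    · norm_num
      simp [List.getElem?_eq_getElem h]
    · rw [ih]
      refine List.map_congr_left (fun k _ => ?_)
      simp only [Function.comp]
      congr 1
      push_cast
      ring
  | case2 s h =>
    have hc : (arr.length - s + 1) / 2 = 0 := by omega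
    rw [hc]
    simp

theorem reverse_map_range {α : Type} (c : Nat) (f : Nat → α) :
    ((List.range c).map f).reverse = (List.range c).map (fun i => f (c - 1 - i)) := by
  apply List.ext_getElem
  · simp
  · intro i h1 h2
    simp only [List.getElem_reverse, List.length_map, List.length_range, List.getElem_map,
      List.getElem_range]

-- what symmetric_order_alt does after the loop, as a function of the loop's result
def symAltLoopPost (arr : List String) (r : List String × List String × Nat) : List String :=
  (if h : r.2.2 < arr.length then r.1 ++ [arr[r.2.2]] else r.1) ++ r.2.1.reverse

theorem symAltLoop_char (arr : List String) (front back : List String) (i : Nat) :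
    symAltLoopPost arr (symAltLoop arr front back i) =
      front ++ everyOtherFrom arr i ++ (everyOtherFrom arr (i + 1)).reverse ++ back.reverse := by
  fun_induction symAltLoop arr front back i with
  | case1 front back i h ih =>
    rw [ih, eOF_cons arr i (by omega), eOF_cons arr (i + 1) h]
    have h3 : i + 1 + 2 = i + 2 + 1 := by omega
    simp [h3]
  | case2 front back i h =>
    simp only [symAltLoopPost]
    by_cases h2 : i < arr.length
    · rw [dif_pos h2]
      rw [eOF_cons arr i h2, eOF_nil arr (i + 2) (by omega), eOF_nil arr (i + 1) (by omega)]
      simp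
    · rw [dif_neg h2]
      rw [eOF_nil arr i h2, eOF_nil arr (i + 1) (by omega)]
      simp

theorem alt_char (arr : List String) :
    symmetric_order_alt arr = everyOtherFrom arr 0 ++ (everyOtherFrom arr 1).reverse := by
  have := symAltLoop_char arr [] [] 0
  simp only [symAltLoopPost, List.reverse_nil, List.append_nil, List.nil_append] at this
  simpa [symmetric_order_alt] using this

theorem a_char (arr : List String) :
    symmetric_order arr = everyOtherFrom arr 0 ++ (everyOtherFrom arr 1).reverse := by
  unfold symmetric_order
  rw [everyOtherFrom_eq_range arr 0, everyOtherFrom_eq_range arr 1]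
  by_cases h0 : arr.length = 0
  · simp [h0, pyRange_neg_two_neg]
  by_cases hp : ((arr.length : Int)) % 2 = 0
  · rw [if_pos hp]
    have h2 : 2 ≤ arr.length := by omega
    have hp' : arr.length % 2 = 0 := by omega
    have hc1 : ((arr.length : Int) - 1) = ((arr.length - 1 : Nat) : Int) := by omega
    have hc2 : ((arr.length : Int) - 2) = ((arr.length - 2 : Nat) : Int) := by omega
    have he : (arr.length - 2) / 2 + 1 = (arr.length - 0 + 1) / 2 := by omega
    have ho : (arr.length - 1) / 2 + 1 = (arr.length - 1 + 1) / 2 := by omega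
    simp only [hc1, hc2, pyRange_neg_two, foldl_append_map, foldl_cons_map, List.nil_append,
      List.map_map, reverse_map_range, Function.comp_def]
    rw [he, ho]
    congr 1
    · refine List.map_congr_left (fun k hk => ?_)
      simp only [List.mem_range] at hk
      congr 1
      omega
    · refine List.map_congr_left (fun k hk => ?_)
      simp only [List.mem_range] at hk
      congr 1
      omega
  · rw [if_neg hp]
    by_cases h1 : arr.length = 1
    · have hc1 : ((arr.length : Int) - 1) = ((0 : Nat) : Int) := by omega
      have hneg : ((arr.length : Int) - 2) < 0 := by omega
      simp only [hc1, pyRange_neg_two, pyRange_neg_two_neg _ hneg,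
        foldl_cons_map, List.append_nil, List.map_map, reverse_map_range,
        Function.comp_def, List.foldl_nil]
      simp [h1]
    · have h3 : 3 ≤ arr.length := by omega
      have hp' : arr.length % 2 = 1 := by omega
      have hc1 : ((arr.length : Int) - 1) = ((arr.length - 1 : Nat) : Int) := by omega
      have hc2 : ((arr.length : Int) - 2) = ((arr.length - 2 : Nat) : Int) := by omega
      have he : (arr.length - 1) / 2 + 1 = (arr.length - 0 + 1) / 2 := by omega
      have ho : (arr.length - 2) / 2 + 1 = (arr.length - 1 + 1) / 2 := by omega
      simp only [hc1, hc2, pyRange_neg_two, foldl_append_map, foldl_cons_map,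
        List.append_nil, List.map_map, reverse_map_range, Function.comp_def]
      rw [he, ho]
      congr 1
      · refine List.map_congr_left (fun k hk => ?_)
        simp only [List.mem_range] at hk
        congr 1
        omega
      · refine List.map_congr_left (fun k hk => ?_)
        simp only [List.mem_range] at hk
        congr 1
        omega

-- ===== VERDICT (by name: the statement is the Claim_ definition above) =====
theorem symmetric_order_spec : Claim_equal_symmetric_order := by
  intro arr _
  unfold Spec_symmetric_order
  rw [a_char, alt_char]
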